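-- pv_equiv track=rewrite | github.com/Lxsse54/cod-speed-syncer | app.py | all_pairs_generator
-- ===== SOURCE A (Python) =====
-- def all_pairs_generator(items, forced_mains=None):
--     if forced_mains is None:
--         forced_mains = set()
--
--     if len(items) < 2:
--         yield []
--         return
--
--     first = items[0]
--     rest = items[1:]
--
--     for i, partner in enumerate(rest):
--         pair = (first, partner)
--         remaining = rest[:i] + rest[i+1:]
--
--         # Check: Is partner allowed to be deputy? (i.e. not in forced_mains)
--         if partner not in forced_mains:
--             for solution in all_pairs_generator(remaining, forced_mains):
--                 yield [pair] + solution
--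
--         # Check: Is first allowed to be deputy?
--         if first not in forced_mains:
--             pair_flipped = (partner, first)
--             for solution in all_pairs_generator(remaining, forced_mains):
--                 yield [pair_flipped] + solution
-- ===== SOURCE B (Python) =====
-- def all_pairs_generator(items, forced_mains=None):
--     # Iterative level-synchronous frontier expansion instead of recursion:
--     # keep a worklist of partial states (remaining items, partial solution)
--     # and expand every state by one pair per round. All states at a round
--     # share the same remaining length, so the final list order equals the
--     # original's lexicographic (partner, orientation) DFS order.
--     forced = set() if forced_mains is None else forced_mains
--     states = [(list(items), [])]
--     while states and len(states[0][0]) >= 2: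
--         nxt = []
--         for rem, sol in states:
--             first, rest = rem[0], rem[1:]
--             for i, partner in enumerate(rest):
--                 newrem = rest[:i] + rest[i + 1:]
--                 if partner not in forced:
--                     nxt.append((newrem, sol + [(first, partner)]))
--                 if first not in forced:
--                     nxt.append((newrem, sol + [(partner, first)]))
--         states = nxt
--     return [sol for _, sol in states]
-- ===== Notes on version B (the rewrite author's own statement) =====
-- stated objective: alternative
-- what changed: B replaces A's recursive generator (which re-runs the whole sub-recursion once per orientation) by an iterative breadth-first worklist of partial states (remaining items, partial solution), expanding every state by one oriented pair per round; level-synchronous expansion preserves A's lexicographic emission order.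
import Mathlib
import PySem

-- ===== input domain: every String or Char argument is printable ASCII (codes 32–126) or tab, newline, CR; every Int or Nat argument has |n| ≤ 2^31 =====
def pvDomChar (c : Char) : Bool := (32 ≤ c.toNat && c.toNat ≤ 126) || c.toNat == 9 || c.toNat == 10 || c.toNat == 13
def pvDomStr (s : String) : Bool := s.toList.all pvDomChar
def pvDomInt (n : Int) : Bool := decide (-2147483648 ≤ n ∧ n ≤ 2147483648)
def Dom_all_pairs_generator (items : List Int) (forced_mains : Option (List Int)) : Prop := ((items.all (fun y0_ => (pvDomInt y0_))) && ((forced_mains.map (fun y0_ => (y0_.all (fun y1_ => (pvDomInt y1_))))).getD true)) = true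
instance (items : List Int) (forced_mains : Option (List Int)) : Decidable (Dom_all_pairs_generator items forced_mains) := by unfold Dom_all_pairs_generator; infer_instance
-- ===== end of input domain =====

-- B replaces A's recursive generator by an iterative level-synchronous worklist of partial states
-- (remaining items, partial solution), expanding every state by one oriented pair per round; same
-- yielded sequence (Python A is a generator; the equivalence is about the yielded sequence).


-- ===== PORT A =====
-- fuel (= items.length at the call) only makes the recursion on 'remaining' structurally total
def pvGoA (forced : List Int) : Nat → List Int → List (List (Int × Int))
  | 0, _ => [[]]
  | fuel + 1, items =>
    if items.length < 2 then [[]]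
    else
      match items with
      | [] => [[]]  -- unreachable: length ≥ 2
      | first :: rest =>
        (PySem.List.enumerate rest).flatMap (fun ip =>
          let remaining := PySem.List.slice rest none (some ip.1) ++ PySem.List.slice rest (some (ip.1 + 1)) none
          (if ip.2 ∉ forced then
            (pvGoA forced fuel remaining).map (fun solution => (first, ip.2) :: solution)
          else []) ++
          (if first ∉ forced then
            (pvGoA forced fuel remaining).map (fun solution => (ip.2, first) :: solution)
          else []))

def all_pairs_generator (items : List Int) (forced_mains : Option (List Int)) : List (List (Int × Int)) :=
  let forced := forced_mains.getD []
  pvGoA forced items.length items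

-- ===== PORT B =====
-- one round of the worklist expansion: every state (rem, sol) emits its children in order
def pvStepB (forced : List Int) (states : List (List Int × List (Int × Int))) : List (List Int × List (Int × Int)) :=
  states.flatMap (fun st =>
    match st.1 with
    | [] => []  -- unreachable: the loop guard ensures 2 ≤ length
    | first :: rest =>
      (PySem.List.enumerate rest).flatMap (fun ip =>
        let newrem := PySem.List.slice rest none (some ip.1) ++ PySem.List.slice rest (some (ip.1 + 1)) none
        (if ip.2 ∉ forced then [(newrem, st.2 ++ [(first, ip.2)])] else []) ++
        (if first ∉ forced then [(newrem, st.2 ++ [(ip.2, first)])] else [])))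

-- the while loop ('while states and len(states[0][0]) >= 2'); fuel only makes it total
def pvLoopB (forced : List Int) : Nat → List (List Int × List (Int × Int)) → List (List Int × List (Int × Int))
  | 0, states => states
  | fuel + 1, states =>
    match states with
    | [] => states
    | (rem, _) :: _ =>
      if 2 ≤ rem.length then pvLoopB forced fuel (pvStepB forced states) else states

def all_pairs_generator_alt (items : List Int) (forced_mains : Option (List Int)) : List (List (Int × Int)) :=
  let forced := forced_mains.getD []
  (pvLoopB forced items.length [(items, [])]).map Prod.snd

-- ===== PRECONDITION & SPEC =====
def Spec_all_pairs_generator (items : List Int) (forced_mains : Option (List Int)) (out : List (List (Int × Int))) : Prop := out = all_pairs_generator_alt items forced_mains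
instance (items : List Int) (forced_mains : Option (List Int)) (out : List (List (Int × Int))) : Decidable (Spec_all_pairs_generator items forced_mains out) := by unfold Spec_all_pairs_generator; infer_instance

-- ===== CLAIM (what is proved, stated in full; the proofs are below) =====
def Claim_equal_all_pairs_generator : Prop := ∀ (items : List Int) (forced_mains : Option (List Int)), Dom_all_pairs_generator items forced_mains → Spec_all_pairs_generator items forced_mains (all_pairs_generator items forced_mains)

-- ===== LEMMAS AND PROOFS =====

-- collapsing a flatMap whose body is a singleton [st.2]
theorem pv_flatMap_triv {α : Type} (states : List (List Int × List α))
    (F : List Int × List α → List (List α)) (h : ∀ st ∈ states, F st = [st.2]) :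
    states.flatMap F = states.map Prod.snd := by
  induction states with
  | nil => rfl
  | cons st tl ih =>
    simp only [List.flatMap_cons, List.map_cons, h st (by simp)]
    rw [ih (fun s hs => h s (by simp [hs]))]
    rfl

-- every state produced by one round has remaining length L - 2
theorem pvStep_len (forced : List Int) (states : List (List Int × List (Int × Int))) (L : Nat)
    (hL : ∀ st ∈ states, st.1.length = L) :
    ∀ st' ∈ pvStepB forced states, st'.1.length = L - 2 := by
  intro st' hst'
  simp only [pvStepB, List.mem_flatMap] at hst'
  obtain ⟨st, hst, hmem⟩ := hst'
  have hlen := hL st hst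
  cases hrem : st.1 with
  | nil => rw [hrem] at hmem; simp at hmem
  | cons first rest =>
    rw [hrem] at hmem hlen
    simp only [List.mem_flatMap] at hmem
    obtain ⟨ip, hip, hm⟩ := hmem
    rw [PySem.List.mem_enumerate_iff] at hip
    obtain ⟨k, hk, rfl⟩ := hip
    simp only [zero_add] at hm
    have h2 : ((k : Nat) : Int) + 1 = (((k + 1 : Nat)) : Int) := by push_cast; ring
    simp only [List.length_cons] at hlen
    rcases List.mem_append.1 hm with h | h <;> split_ifs at h <;>
      simp only [List.mem_singleton, List.not_mem_nil] at h <;>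
      (rw [h]
       simp only [h2, PySem.List.slice_to_natCast, PySem.List.slice_from_natCast,
         List.length_append, List.length_take, List.length_drop]
       omega)

-- one state's children, flattened through the sub-solutions, give A's one-level expansion
theorem pv_state_eq (forced : List Int) (fuel : Nat) (first : Int) (rest : List Int)
    (sol : List (Int × Int)) (hr : rest ≠ []) :
    ((PySem.List.enumerate rest).flatMap (fun ip =>
        (if ip.2 ∉ forced then [(PySem.List.slice rest none (some ip.1) ++
            PySem.List.slice rest (some (ip.1 + 1)) none, sol ++ [(first, ip.2)])] else []) ++
        (if first ∉ forced then [(PySem.List.slice rest none (some ip.1) ++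
            PySem.List.slice rest (some (ip.1 + 1)) none, sol ++ [(ip.2, first)])] else []))).flatMap
      (fun st => (pvGoA forced fuel st.1).map (fun s => st.2 ++ s))
    = (pvGoA forced (fuel + 1) (first :: rest)).map (fun s => sol ++ s) := by
  have hguard : ¬ (first :: rest).length < 2 := by
    cases rest with
    | nil => exact absurd rfl hr
    | cons a tl => simp only [List.length_cons]; omega
  conv_rhs => rw [pvGoA]
  rw [if_neg hguard]
  simp only [List.map_flatMap, List.flatMap_assoc]
  refine List.flatMap_congr ?_
  intro ip _
  split_ifs <;>
    simp [Function.comp_def, List.append_assoc]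

-- one loop round corresponds to peeling one level of A's recursion
theorem pv_step_eq (forced : List Int) (fuel : Nat) (L : Nat) (h2 : 2 ≤ L) :
    ∀ (states : List (List Int × List (Int × Int))), (∀ st ∈ states, st.1.length = L) →
    (pvStepB forced states).flatMap (fun st => (pvGoA forced fuel st.1).map (fun s => st.2 ++ s))
    = states.flatMap (fun st => (pvGoA forced (fuel + 1) st.1).map (fun s => st.2 ++ s)) := by
  intro states
  induction states with
  | nil => intro _; rfl
  | cons st tl ih =>
    intro hL
    obtain ⟨rem, sol⟩ := st
    have hlen : rem.length = L := hL (rem, sol) (by simp)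
    have hstep : pvStepB forced ((rem, sol) :: tl) =
        pvStepB forced [(rem, sol)] ++ pvStepB forced tl := by
      simp [pvStepB]
    rw [hstep, List.flatMap_append, List.flatMap_cons,
      ih (fun s hs => hL s (by simp [hs]))]
    congr 1
    cases rem with
    | nil => simp at hlen; omega
    | cons first rest =>
      have hr : rest ≠ [] := by
        intro h; subst h; simp at hlen; omega
      rw [← pv_state_eq forced fuel first rest sol hr]
      congr 1
      simp [pvStepB]

-- A on any input of length < 2 yields the single empty solution
theorem pvGoA_small (forced : List Int) (fuel : Nat) (items : List Int)
    (h : items.length < 2) : pvGoA forced fuel items = [[]] := by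
  cases fuel with
  | zero => rfl
  | succ f =>
    cases items with
    | nil => rfl
    | cons a tl =>
      cases tl with
      | nil => rfl
      | cons b tl2 => simp [List.length_cons] at h

-- the whole loop, with the uniform-remaining-length invariant
theorem pv_loop_eq (forced : List Int) :
    ∀ (fuel : Nat) (L : Nat) (states : List (List Int × List (Int × Int))),
    (∀ st ∈ states, st.1.length = L) →
    (pvLoopB forced fuel states).map Prod.snd
      = states.flatMap (fun st => (pvGoA forced fuel st.1).map (fun s => st.2 ++ s)) := by
  intro fuel
  induction fuel with
  | zero =>
    intro L states _
    rw [pvLoopB, pv_flatMap_triv]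
    intro st _
    simp [pvGoA]
  | succ fuel ih =>
    intro L states hL
    cases states with
    | nil => rfl
    | cons st tl =>
      obtain ⟨rem, sol⟩ := st
      have hlen : rem.length = L := hL (rem, sol) (by simp)
      rw [pvLoopB]
      by_cases hg : 2 ≤ rem.length
      · rw [if_pos hg,
          ih (L - 2) _ (pvStep_len forced ((rem, sol) :: tl) L hL),
          pv_step_eq forced fuel L (hlen ▸ hg) _ hL]
      · rw [if_neg hg, pv_flatMap_triv]
        intro s hs
        rw [pvGoA_small forced (fuel + 1) s.1 (by rw [hL s hs]; omega)]
        simp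

-- ===== VERDICT (by name: the statement is the Claim_ definition above) =====
theorem all_pairs_generator_spec : Claim_equal_all_pairs_generator := by
  intro items forced_mains _
  unfold Spec_all_pairs_generator all_pairs_generator all_pairs_generator_alt
  rw [pv_loop_eq (forced_mains.getD []) items.length items.length [(items, [])] (by simp)]
  simp
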